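-- pv_equiv track=rewrite | github.com/Fjscah/ExonDataSimulation | basic.py | not_indexs
-- ===== SOURCE A (Python) =====
-- def not_indexs(string, char):
--     l, s, x, y, i, t = [], [], 0, 0, 0, False
--     for i, n in enumerate(string):
--         if n != char and not t:
--             x = i
--             t = True
--         elif n == char and t:
--             y = i
--             l.append((x, y-1))
--             t = False
--     if t:
--         l.append((x, i))
--     if l:
--         for n in l:
--             s.append(string[n[0]:n[1]+1])
--     return l, s
-- ===== SOURCE B (Python) =====
-- def not_indexs(string, char):
--     # two-pointer scan over runs instead of an open/close flag state machine
--     l = []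
--     i, n = 0, len(string)
--     while i < n:
--         if string[i] == char:
--             i += 1
--         else:
--             j = i
--             while j < n and string[j] != char:
--                 j += 1
--             l.append((i, j - 1))
--             i = j
--     s = [string[a:b + 1] for a, b in l]
--     return l, s
-- ===== Notes on version B (the rewrite author's own statement) =====
-- stated objective: alternative
-- what changed: Replaces A's enumerate loop with an open/close boolean flag state machine by a two-pointer scan that consumes each maximal non-char run at once, then slices the recorded ranges.
import Mathlib
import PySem

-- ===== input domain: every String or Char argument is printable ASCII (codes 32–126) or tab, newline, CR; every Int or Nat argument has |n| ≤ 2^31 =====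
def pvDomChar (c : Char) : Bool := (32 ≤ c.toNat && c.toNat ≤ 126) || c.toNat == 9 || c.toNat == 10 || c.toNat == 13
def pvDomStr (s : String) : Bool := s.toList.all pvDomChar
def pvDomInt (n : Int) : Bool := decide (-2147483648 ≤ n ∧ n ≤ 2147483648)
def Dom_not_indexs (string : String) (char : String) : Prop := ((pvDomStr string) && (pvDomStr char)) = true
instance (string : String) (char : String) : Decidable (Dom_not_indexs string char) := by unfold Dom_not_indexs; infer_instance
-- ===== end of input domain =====

-- B replaces A's boolean-flag state machine by a two-pointer run scan; same cost, alternative structure.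


-- ===== PORT A =====
-- state (l, x, i, t); i is the loop index variable (last index seen)
def pvStepA (char : String) (st : List (Int × Int) × Int × Int × Bool) (p : Int × Char) :
    List (Int × Int) × Int × Int × Bool :=
  match st, p with
  | (l, x, _i, t), (idx, c) =>
    if c.toString ≠ char ∧ t = false then (l, idx, idx, true)
    else if c.toString = char ∧ t = true then (l ++ [(x, idx - 1)], x, idx, false)
    else (l, x, idx, t)

def not_indexs (string : String) (char : String) : (List (Int × Int)) × List String :=
  match (PySem.List.enumerate string.toList 0).foldl (pvStepA char) ([], 0, 0, false) with
  | (l0, x, i, t) =>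
    let l := if t then l0 ++ [(x, i)] else l0
    let s := if l = [] then [] else l.map (fun p => PySem.Str.slice string (some p.1) (some (p.2 + 1)))
    (l, s)

-- ===== PORT B =====
-- two-pointer scan: skip a char, or consume a whole maximal non-char run at once
def pvNe (char : String) (d : Char) : Bool := d.toString ≠ char

def pvRunB (char : String) : List Char → Int → List (Int × Int)
  | [], _ => []
  | c :: rest, pos =>
    if pvNe char c then
      let k := (rest.takeWhile (pvNe char)).length
      (pos, pos + k) :: pvRunB char (rest.drop k) (pos + 1 + k)
    else pvRunB char rest (pos + 1)
  termination_by cs _ => cs.length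
  decreasing_by
    all_goals simp

def not_indexs_alt (string : String) (char : String) : (List (Int × Int)) × List String :=
  let l := pvRunB char string.toList 0
  let s := l.map (fun p => PySem.Str.slice string (some p.1) (some (p.2 + 1)))
  (l, s)

-- ===== PRECONDITION & SPEC =====
def Spec_not_indexs (string : String) (char : String) (out : (List (Int × Int)) × List String) : Prop := out = not_indexs_alt string char
instance (string : String) (char : String) (out : (List (Int × Int)) × List String) : Decidable (Spec_not_indexs string char out) := by unfold Spec_not_indexs; infer_instance

-- ===== CLAIM (what is proved, stated in full; the proofs are below) =====
def Claim_equal_not_indexs : Prop := ∀ (string : String) (char : String), Dom_not_indexs string char → Spec_not_indexs string char (not_indexs string char)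

-- ===== LEMMAS AND PROOFS =====

theorem pvRunB_nil (char : String) (pos : Int) : pvRunB char [] pos = [] := by
  rw [pvRunB.eq_def]

theorem pvRunB_cons (char : String) (c : Char) (rest : List Char) (pos : Int) :
    pvRunB char (c :: rest) pos =
      if pvNe char c then
        (pos, pos + ((rest.takeWhile (pvNe char)).length : Int)) ::
          pvRunB char (rest.drop (rest.takeWhile (pvNe char)).length)
            (pos + 1 + (rest.takeWhile (pvNe char)).length)
      else pvRunB char rest (pos + 1) := by
  rw [pvRunB.eq_def]

-- "a segment opened at x is still running, last processed index = last"
def pvContB (char : String) : List Char → Int → Int → List (Int × Int)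
  | [], last, x => [(x, last)]
  | c :: rest, last, x =>
    if pvNe char c then pvContB char rest (last + 1) x
    else (x, last) :: pvRunB char rest (last + 1 + 1)

theorem pvContB_eq (char : String) : ∀ (cs : List Char) (last x : Int),
    pvContB char cs last x =
      (x, last + ((cs.takeWhile (pvNe char)).length : Int)) ::
        pvRunB char (cs.drop (cs.takeWhile (pvNe char)).length)
          (last + 1 + (cs.takeWhile (pvNe char)).length) := by
  intro cs
  induction cs with
  | nil => intro last x; simp [pvContB, pvRunB_nil]
  | cons c rest ih =>
    intro last x
    by_cases h : pvNe char c = true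
    · rw [pvContB, if_pos h, ih (last + 1) x]
      simp [h]
      constructor
      · omega
      · congr 1
        omega
    · have h' : pvNe char c = false := by simpa using h
      rw [pvContB, if_neg h]
      simp [h']
      rw [pvRunB_cons, if_neg h]

def pvFinish (st : List (Int × Int) × Int × Int × Bool) : List (Int × Int) :=
  match st with
  | (l, x, i, t) => if t then l ++ [(x, i)] else l

theorem pvMain (char : String) : ∀ (cs : List Char),
    (∀ (pos : Int) (l : List (Int × Int)) (x i : Int),
      pvFinish ((PySem.List.enumerate cs pos).foldl (pvStepA char) (l, x, i, false)) =
        l ++ pvRunB char cs pos) ∧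
    (∀ (pos : Int) (l : List (Int × Int)) (x : Int),
      pvFinish ((PySem.List.enumerate cs (pos + 1)).foldl (pvStepA char) (l, x, pos, true)) =
        l ++ pvContB char cs pos x) := by
  intro cs
  induction cs with
  | nil =>
    constructor
    · intro pos l x i; simp [PySem.List.enumerate, pvFinish, pvRunB_nil]
    · intro pos l x; simp [PySem.List.enumerate, pvFinish, pvContB]
  | cons c rest ih =>
    constructor
    · intro pos l x i
      rw [PySem.List.enumerate_cons]
      by_cases h : pvNe char c = true
      · have h' : ¬ (String.singleton c = char) := by simpa [pvNe] using h
        rw [List.foldl_cons, show pvStepA char (l, x, i, false) (pos, c) = (l, pos, pos, true) from by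
          simp [pvStepA, h']]
        rw [ih.2 pos l pos]
        rw [pvContB_eq, pvRunB_cons, if_pos h]
      · have h' : String.singleton c = char := by simpa [pvNe] using h
        rw [List.foldl_cons, show pvStepA char (l, x, i, false) (pos, c) = (l, x, pos, false) from by
          simp [pvStepA, h']]
        rw [ih.1 (pos + 1) l x pos]
        rw [pvRunB_cons, if_neg h]
    · intro pos l x
      rw [PySem.List.enumerate_cons]
      by_cases h : pvNe char c = true
      · have h' : ¬ (String.singleton c = char) := by simpa [pvNe] using h
        rw [List.foldl_cons, show pvStepA char (l, x, pos, true) (pos + 1, c)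
              = (l, x, pos + 1, true) from by simp [pvStepA, h']]
        rw [ih.2 (pos + 1) l x]
        rw [pvContB, if_pos h]
      · have h' : String.singleton c = char := by simpa [pvNe] using h
        rw [List.foldl_cons, show pvStepA char (l, x, pos, true) (pos + 1, c)
              = (l ++ [(x, pos)], x, pos + 1, false) from by simp [pvStepA, h']]
        rw [ih.1 (pos + 1 + 1) (l ++ [(x, pos)]) x (pos + 1)]
        rw [pvContB, if_neg h]
        simp

-- ===== VERDICT (by name: the statement is the Claim_ definition above) =====
theorem not_indexs_spec : Claim_equal_not_indexs := by
  intro string char _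
  unfold Spec_not_indexs not_indexs not_indexs_alt
  have h := (pvMain char string.toList).1 0 [] 0 0
  rcases hst : (PySem.List.enumerate string.toList 0).foldl (pvStepA char) ([], 0, 0, false)
    with ⟨l0, x, i, t⟩
  rw [hst] at h
  simp only [pvFinish, List.nil_append] at h
  simp only [h]
  by_cases hl : pvRunB char string.toList 0 = []
  · simp [hl]
  · simp [hl]
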